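-- pv_equiv track=rewrite | github.com/deepika-0507/maximl_python_task | substring_distinct_chars.py | find_min_distinct_substring
-- ===== SOURCE A (Python) =====
-- def find_min_distinct_substring(S):
--
-- 	dist_chars = len(set(S))
--
-- 	dist_string = {}
-- 	count = 0
-- 	start_window = 0
-- 	min_dist_chars = len(S)
-- 	end_window = len(S)
-- 	start_window_index = start_window
--
-- 	for j in range(len(S)):
-- 		if S[j] in dist_string:
-- 			dist_string[S[j]] +=1
-- 		else:
-- 			dist_string[S[j]] = 1
-- 			count+=1
--
-- 		if count == dist_chars:
-- 			while dist_string[S[start_window]] > 1: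
-- 				if dist_string[S[start_window]] > 1:
-- 					dist_string[S[start_window]] -= 1
--
-- 				start_window += 1
--
-- 			len_window = j - start_window + 1
--
-- 			if min_dist_chars > len_window:
-- 				min_dist_chars = len_window
-- 				start_window_index = start_window
-- 				end_window = start_window_index + min_dist_chars
--
-- 	sub_string = str(S[start_window_index: end_window])
--
-- 	return len(sub_string)
-- ===== SOURCE B (Python) =====
-- def find_min_distinct_substring(S):
--     # One pass tracking the LAST occurrence of each character instead of
--     # counts + a shrinking left pointer: the minimal window ending at j
--     # starts at min(last occurrences), so the answer is the minimum of
--     # j - min(last.values()) + 1 over all j once every distinct char has appeared.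
--     total = len(set(S))
--     if total == 0:
--         return 0
--     last = {}
--     best = len(S)
--     for j, ch in enumerate(S):
--         last[ch] = j
--         if len(last) == total:
--             best = min(best, j - min(last.values()) + 1)
--     return best
-- ===== Notes on version B (the rewrite author's own statement) =====
-- stated objective: alternative
-- what changed: Replaces A's counts-dict plus shrinking-left-pointer sliding window (with min-window start/end bookkeeping and a final slice) by a single pass that tracks only the last occurrence of each character: the minimal window ending at j starts at min(last.values()), so B just minimises j - min(last.values()) + 1.
import Mathlib
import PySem

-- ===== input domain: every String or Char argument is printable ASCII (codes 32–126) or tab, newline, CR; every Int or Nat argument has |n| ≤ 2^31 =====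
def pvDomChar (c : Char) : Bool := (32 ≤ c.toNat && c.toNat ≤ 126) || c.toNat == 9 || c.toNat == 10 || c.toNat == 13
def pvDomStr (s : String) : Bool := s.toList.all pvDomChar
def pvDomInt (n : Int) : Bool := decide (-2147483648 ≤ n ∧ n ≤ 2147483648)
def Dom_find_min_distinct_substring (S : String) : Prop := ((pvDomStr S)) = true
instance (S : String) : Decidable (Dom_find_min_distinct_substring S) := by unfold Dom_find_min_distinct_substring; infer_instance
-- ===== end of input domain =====

-- B replaces A's counts-dict + shrinking-left-pointer sliding window by a one-pass
-- last-occurrence dict: the minimal window ending at j starts at min(last.values()).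
-- Objective: alternative (different algorithm, similar cost); equivalence proved for all strings.

-- ===== PORT A =====
-- the 'while dist_string[S[start_window]] > 1' loop of A (the 'start < len' conjunct is a
-- totality guard for the index S[start_window]; Python never reaches start ≥ len here)
def pvShrink (l : List Char) (d : PySem.Dict Char Int) (start : Nat) :
    PySem.Dict Char Int × Nat :=
  if h : start < l.length ∧ 1 < d.getD (l.getD start ' ') 0 then
    pvShrink l (d.modify (l.getD start ' ') 0 (· - 1)) (start + 1)
  else (d, start)
termination_by l.length - start
decreasing_by omega

-- loop body of A's 'for j in range(len(S))'; state = (dist_string, count, start_window,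
-- min_dist_chars, start_window_index, end_window); start_window is kept as Nat (it starts
-- at 0 and only ever increments)
def pvStepA (l : List Char) (dc : Int)
    (st : PySem.Dict Char Int × Int × Nat × Int × Int × Int) (j : Int) :
    PySem.Dict Char Int × Int × Nat × Int × Int × Int :=
  match st with
  | (d, count, start, minL, si, ew) =>
    let c := PySem.List.pyGetD l j ' '
    let dc' := if d.contains c then (d.modify c 0 (· + 1), count) else (d.insert c 1, count + 1)
    let d1 := dc'.1
    let count1 := dc'.2
    if count1 = dc then
      let ds := pvShrink l d1 start
      let lenW : Int := j - (ds.2 : Int) + 1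
      if minL > lenW then (ds.1, count1, ds.2, lenW, (ds.2 : Int), (ds.2 : Int) + lenW)
      else (ds.1, count1, ds.2, minL, si, ew)
    else (d1, count1, start, minL, si, ew)

def find_min_distinct_substring (S : String) : Int :=
  let l := S.toList
  let dist_chars : Int := ((PySem.Set.ofList l).length : Int)
  let st := (PySem.List.pyRange 0 (l.length : Int) 1).foldl (pvStepA l dist_chars)
      (PySem.Dict.empty, 0, 0, (l.length : Int), 0, (l.length : Int))
  ((PySem.List.slice l (some st.2.2.2.2.1) (some st.2.2.2.2.2)).length : Int)

-- ===== PORT B =====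
-- loop body of B's 'for j, ch in enumerate(S)'; state = (last, best)
def pvStepB (total : Int) (st : PySem.Dict Char Int × Int) (p : Int × Char) :
    PySem.Dict Char Int × Int :=
  let last := st.1.insert p.2 p.1
  if (last.size : Int) = total then
    (last, min st.2 (p.1 - (PySem.List.min? last.values (fun v => v)).getD 0 + 1))
  else (last, st.2)

def find_min_distinct_substring_alt (S : String) : Int :=
  let l := S.toList
  let total : Int := ((PySem.Set.ofList l).length : Int)
  if total = 0 then 0
  else ((PySem.List.enumerate l 0).foldl (pvStepB total) (PySem.Dict.empty, (l.length : Int))).2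

-- ===== PRECONDITION & SPEC =====
def Spec_find_min_distinct_substring (S : String) (out : Int) : Prop := out = find_min_distinct_substring_alt S
instance (S : String) (out : Int) : Decidable (Spec_find_min_distinct_substring S out) := by unfold Spec_find_min_distinct_substring; infer_instance

-- ===== CLAIM (what is proved, stated in full; the proofs are below) =====
def Claim_equal_find_min_distinct_substring : Prop := ∀ (S : String), Dom_find_min_distinct_substring S → Spec_find_min_distinct_substring S (find_min_distinct_substring S)

-- ===== LEMMAS AND PROOFS =====

-- combined loop invariant after the first j characters of l: a = A's state
-- (dist_string, count, start_window, min_dist_chars, start_window_index, end_window),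
-- b = B's state (last, best)
def pvInv (l : List Char) (j : Nat)
    (a : PySem.Dict Char Int × Int × Nat × Int × Int × Int)
    (b : PySem.Dict Char Int × Int) : Prop :=
  match a, b with
  | (d, count, start, minL, si, ew), (last, best) =>
    last.keys.Nodup ∧
    (∀ c, last.contains c = true ↔ c ∈ l.take j) ∧
    (∀ c i, last.get? c = some i → ∃ k : Nat, i = (k : Int) ∧ k < j ∧
        l.getD k ' ' = c ∧ c ∉ (l.take j).drop (k + 1)) ∧
    last.size = (PySem.Set.ofList (l.take j)).length ∧
    count = (last.size : Int) ∧
    (∀ c, d.contains c = true ↔ c ∈ l.take j) ∧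
    (∀ c, d.getD c 0 = (((l.take j).drop start).count c : Int)) ∧
    start ≤ j ∧
    (count ≠ ((PySem.Set.ofList l).length : Int) → start = 0) ∧
    (count = ((PySem.Set.ofList l).length : Int) →
        (start : Int) = (PySem.List.min? last.values (fun v => v)).getD 0) ∧
    minL = best ∧ ew = si + minL ∧ 0 ≤ si ∧ si + minL ≤ (l.length : Int) ∧ 0 ≤ minL

def pvFoldA (l : List Char) (j : Nat) :
    PySem.Dict Char Int × Int × Nat × Int × Int × Int :=
  (PySem.List.pyRange 0 (j : Int) 1).foldl
    (pvStepA l ((PySem.Set.ofList l).length : Int))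
    (PySem.Dict.empty, 0, 0, (l.length : Int), 0, (l.length : Int))

def pvFoldB (l : List Char) (j : Nat) : PySem.Dict Char Int × Int :=
  (PySem.List.enumerate (l.take j) 0).foldl
    (pvStepB ((PySem.Set.ofList l).length : Int))
    (PySem.Dict.empty, (l.length : Int))

lemma pvSetLen_append (xs : List Char) (x : Char) :
    (PySem.Set.ofList (xs ++ [x])).length =
      (PySem.Set.ofList xs).length + (if x ∈ xs then 0 else 1) := by
  rw [PySem.Set.ofList_eq_foldl, List.foldl_append, ← PySem.Set.ofList_eq_foldl]
  by_cases hx : x ∈ xs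
  · simp [PySem.Set.add, hx]
  · simp [PySem.Set.add, hx]

lemma pvSetLen_take_le (l : List Char) (j : Nat) :
    (PySem.Set.ofList (l.take j)).length ≤ (PySem.Set.ofList l).length := by
  apply List.Subperm.length_le
  apply List.subperm_of_subset (PySem.Set.nodup_ofList _)
  intro y hy
  rw [PySem.Set.mem_ofList] at *
  exact List.mem_of_mem_take hy

lemma pvSetLen_pos (l : List Char) (h : l ≠ []) : 0 < (PySem.Set.ofList l).length := by
  obtain ⟨x, xs, rfl⟩ := List.exists_cons_of_ne_nil h
  have hx : x ∈ PySem.Set.ofList (x :: xs) :=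
    (PySem.Set.mem_ofList _ _).2 (List.mem_cons.mpr (Or.inl rfl))
  exact List.length_pos_of_mem hx

lemma pvMemValues_of_get? {d : PySem.Dict Char Int} {c : Char} {i : Int}
    (h : d.get? c = some i) : i ∈ d.values := by
  have hi := PySem.Dict.mem_items_of_get?_eq_some d h
  have hm := List.mem_map_of_mem (f := fun p => p.2) hi
  simp only [PySem.Dict.values]
  exact hm

lemma pvGet?_of_mem_values {d : PySem.Dict Char Int} (hnd : d.keys.Nodup) {i : Int}
    (h : i ∈ d.values) : ∃ c, d.get? c = some i := by
  simp only [PySem.Dict.values, List.mem_map] at h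
  obtain ⟨p, hp, rfl⟩ := h
  exact ⟨p.1, PySem.Dict.get?_of_mem_items _ hp hnd⟩

lemma pvValues_length (d : PySem.Dict Char Int) : d.values.length = d.size := by
  simp [PySem.Dict.values, PySem.Dict.size]

lemma pvTwo_le_count {w : List Char} {p q : Nat} {c : Char} (hpq : p < q)
    (hq : q < w.length) (hcp : w[p]'(by omega) = c) (hcq : w[q]'hq = c) :
    2 ≤ w.count c := by
  have h1 : 1 ≤ (w.take q).count c := by
    refine List.count_pos_iff.2 ?_
    have hh : p < (w.take q).length := by simp [List.length_take]; omega
    have : (w.take q)[p]'hh = c := by rw [List.getElem_take]; exact hcp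
    exact this ▸ List.getElem_mem hh
  have h2 : 1 ≤ (w.drop q).count c := by
    refine List.count_pos_iff.2 ?_
    have hh : 0 < (w.drop q).length := by simp [List.length_drop]; omega
    have : (w.drop q)[0]'hh = c := by rw [List.getElem_drop]; simpa using hcq
    exact this ▸ List.getElem_mem hh
  calc 2 ≤ (w.take q).count c + (w.drop q).count c := by omega
    _ = w.count c := by rw [← List.count_append, List.take_append_drop]

-- specification of A's shrinking 'while' loop: starting at any s ≤ M it stops exactly at
-- M = min(last.values()) and the dict then holds the counts of l[M..j]
lemma pvShrink_spec (l : List Char) (j : Nat) (hj : j < l.length)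
    (last : PySem.Dict Char Int)
    (hnd : last.keys.Nodup)
    (hocc : ∀ c i, last.get? c = some i → ∃ k : Nat, i = (k : Int) ∧ k < j + 1 ∧
        l.getD k ' ' = c ∧ c ∉ (l.take (j + 1)).drop (k + 1))
    (hmem : ∀ c, last.contains c = true ↔ c ∈ l.take (j + 1))
    (M : Nat)
    (hM : PySem.List.min? last.values (fun v => v) = some ((M : Int)))
    (d : PySem.Dict Char Int) (s : Nat) (hs : s ≤ M)
    (hdm : ∀ c, d.contains c = true ↔ c ∈ l.take (j + 1))
    (hd : ∀ c, d.getD c 0 = (((l.take (j + 1)).drop s).count c : Int)) :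
    (pvShrink l d s).2 = M ∧
    (∀ c, (pvShrink l d s).1.contains c = true ↔ c ∈ l.take (j + 1)) ∧
    (∀ c, (pvShrink l d s).1.getD c 0 = (((l.take (j + 1)).drop M).count c : Int)) := by
  have hlen_take : (l.take (j + 1)).length = j + 1 := by simp [List.length_take]; omega
  obtain ⟨cM, hcM⟩ := pvGet?_of_mem_values hnd (PySem.List.min?_mem hM)
  obtain ⟨kM, hkM, hkMlt, hkMc, hkMnot⟩ := hocc cM _ hcM
  have hMeq : kM = M := by exact_mod_cast hkM.symm
  subst hMeq
  generalize hfuel : kM - s = fuel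
  induction fuel generalizing d s with
  | zero =>
    have hsM : s = kM := by omega
    subst hsM
    have hone : d.getD (l.getD s ' ') 0 = 1 := by
      rw [hkMc, hd cM]
      have h1 : s < (l.take (j + 1)).length := by omega
      have hdrop : (l.take (j + 1)).drop s = cM :: (l.take (j + 1)).drop (s + 1) := by
        rw [List.drop_eq_getElem_cons h1]
        congr 1
        rw [List.getElem_take, ← hkMc, List.getD_eq_getElem l ' ' (by omega)]
      rw [hdrop]
      have h0 : ((l.take (j + 1)).drop (s + 1)).count cM = 0 :=
        List.count_eq_zero.2 hkMnot
      simp [h0]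
    have hng : ¬ (s < l.length ∧ 1 < d.getD (l.getD s ' ') 0) := by
      rw [hone]
      intro hcon
      exact absurd hcon.2 (by omega)
    rw [pvShrink, dif_neg hng]
    exact ⟨rfl, hdm, hd⟩
  | succ f ih =>
    have hsM : s < kM := by omega
    have hslen : s < l.length := by omega
    have hschar : (l.take (j + 1))[s]'(by omega) = l.getD s ' ' := by
      rw [List.getElem_take, List.getD_eq_getElem l ' ' hslen]
    have hscharmem : l.getD s ' ' ∈ l.take (j + 1) := hschar ▸ List.getElem_mem (by omega)
    obtain ⟨iS, hiS⟩ : ∃ i, last.get? (l.getD s ' ') = some i := by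
      have hcont := (hmem (l.getD s ' ')).2 hscharmem
      rw [PySem.Dict.contains_eq_isSome_get?] at hcont
      exact Option.isSome_iff_exists.mp hcont
    obtain ⟨kS, hkS, hkSlt, hkSc, hkSnot⟩ := hocc _ _ hiS
    have hkSge : (kM : Int) ≤ iS := PySem.List.min?_isMin hM _ (pvMemValues_of_get? hiS)
    have hkSge' : kM ≤ kS := by rw [hkS] at hkSge; exact_mod_cast hkSge
    have h2c : 2 ≤ ((l.take (j + 1)).drop s).count (l.getD s ' ') := by
      have hq : kS - s < ((l.take (j + 1)).drop s).length := by
        simp [List.length_drop, hlen_take]; omega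
      apply pvTwo_le_count (p := 0) (q := kS - s) (by omega) hq
      · rw [List.getElem_drop]
        have : (l.take (j + 1))[s + 0]'(by omega) = l.getD s ' ' := by
          simpa using hschar
        exact this
      · rw [List.getElem_drop]
        have h1 : s + (kS - s) = kS := by omega
        have : (l.take (j + 1))[s + (kS - s)]'(by omega) = l.getD s ' ' := by
          simp only [h1]
          rw [List.getElem_take, ← List.getD_eq_getElem l ' ' (by omega : kS < l.length)]
          exact hkSc
        exact this
    have hguard : s < l.length ∧ 1 < d.getD (l.getD s ' ') 0 := by
      refine ⟨hslen, ?_⟩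
      rw [hd]
      omega
    rw [pvShrink, dif_pos hguard]
    have hdrop : (l.take (j + 1)).drop s = (l.getD s ' ') :: (l.take (j + 1)).drop (s + 1) := by
      rw [List.drop_eq_getElem_cons (by omega : s < (l.take (j+1)).length), hschar]
    apply ih (d.modify (l.getD s ' ') 0 (· - 1)) (s + 1)
    · intro c
      rw [PySem.Dict.contains_modify]
      simp only [Bool.or_eq_true, beq_iff_eq]
      constructor
      · rintro (rfl | hc)
        · exact hscharmem
        · exact (hdm c).1 hc
      · intro hc
        exact Or.inr ((hdm c).2 hc)
    · intro c
      rw [PySem.Dict.getD_modify]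
      by_cases hce : c = l.getD s ' '
      · rw [if_pos hce, hd, hdrop, hce]
        have h1 : List.count (l.getD s ' ') (l.getD s ' ' :: (l.take (j + 1)).drop (s + 1)) =
            ((l.take (j + 1)).drop (s + 1)).count (l.getD s ' ') + 1 := by
          simp
        rw [h1]
        push_cast
        ring
      · rw [if_neg hce, hd, hdrop]
        have h1 : List.count c (l.getD s ' ' :: (l.take (j + 1)).drop (s + 1)) =
            ((l.take (j + 1)).drop (s + 1)).count c := by
          simp only [List.count_cons, beq_iff_eq]
          rw [if_neg (fun h => hce (Eq.symm h))]
          omega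
        rw [h1]
    · omega
    · omega

-- second half of the per-step argument, shared by both branches of 'S[j] in dist_string'
lemma pvInv_step2 (l : List Char) (j : Nat) (hj : j < l.length)
    (d1 : PySem.Dict Char Int) (count1 : Int) (start : Nat) (minL si ew : Int)
    (last' : PySem.Dict Char Int) (best : Int)
    (h1' : last'.keys.Nodup)
    (h2' : ∀ c, last'.contains c = true ↔ c ∈ l.take (j + 1))
    (h3' : ∀ c i, last'.get? c = some i → ∃ k : Nat, i = (k : Int) ∧ k < j + 1 ∧
        l.getD k ' ' = c ∧ c ∉ (l.take (j + 1)).drop (k + 1))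
    (h4' : last'.size = (PySem.Set.ofList (l.take (j + 1))).length)
    (hc1 : count1 = (last'.size : Int))
    (hd1m : ∀ c, d1.contains c = true ↔ c ∈ l.take (j + 1))
    (hd1 : ∀ c, d1.getD c 0 = (((l.take (j + 1)).drop start).count c : Int))
    (h9 : start ≤ j)
    (h10 : count1 ≠ ((PySem.Set.ofList l).length : Int) → start = 0)
    (hsm : ∀ m : Int, PySem.List.min? last'.values (fun v => v) = some m → (start : Int) ≤ m)
    (h12 : minL = best) (h13 : ew = si + minL) (h14 : 0 ≤ si)
    (h15 : si + minL ≤ (l.length : Int)) (h16 : 0 ≤ minL) :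
    pvInv l (j + 1)
      (if count1 = ((PySem.Set.ofList l).length : Int) then
        (if minL > (j : Int) - ((pvShrink l d1 start).2 : Int) + 1 then
          ((pvShrink l d1 start).1, count1, (pvShrink l d1 start).2,
            (j : Int) - ((pvShrink l d1 start).2 : Int) + 1,
            ((pvShrink l d1 start).2 : Int),
            ((pvShrink l d1 start).2 : Int) + ((j : Int) - ((pvShrink l d1 start).2 : Int) + 1))
         else ((pvShrink l d1 start).1, count1, (pvShrink l d1 start).2, minL, si, ew))
       else (d1, count1, start, minL, si, ew))
      (if (last'.size : Int) = ((PySem.Set.ofList l).length : Int) then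
        (last', min best ((j : Int) - (PySem.List.min? last'.values (fun v => v)).getD 0 + 1))
       else (last', best)) := by
  have hjlt : (j : Int) < (l.length : Int) := by exact_mod_cast hj
  by_cases hq : count1 = ((PySem.Set.ofList l).length : Int)
  · have hql : (last'.size : Int) = ((PySem.Set.ofList l).length : Int) := by
      rw [← hc1]; exact hq
    rw [if_pos hq, if_pos hql]
    have hlne : l ≠ [] := by intro h; rw [h] at hj; simp at hj
    have hdcpos : 0 < (PySem.Set.ofList l).length := pvSetLen_pos l hlne
    have hvne : last'.values ≠ [] := by
      intro hv
      have hsz : last'.size = 0 := by rw [← pvValues_length, hv]; rfl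
      rw [hsz] at hql
      simp at hql
      omega
    obtain ⟨m, hm⟩ : ∃ m, PySem.List.min? last'.values (fun v => v) = some m := by
      cases hmm : PySem.List.min? last'.values (fun v => v) with
      | none => exact absurd ((PySem.List.min?_eq_none_iff _ _).1 hmm) hvne
      | some m => exact ⟨m, rfl⟩
    obtain ⟨cM, hcM⟩ := pvGet?_of_mem_values h1' (PySem.List.min?_mem hm)
    obtain ⟨M, hMi, hMlt, hMc, hMnot⟩ := h3' cM m hcM
    have hsM : start ≤ M := by
      have h := hsm m hm
      rw [hMi] at h
      exact_mod_cast h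
    have hMle : M ≤ j := by omega
    have hm' : PySem.List.min? last'.values (fun v => v) = some ((M : Int)) := by
      rw [hm, hMi]
    obtain ⟨hS2, hSm, hSd⟩ := pvShrink_spec l j hj last' h1' h3' h2' M hm' d1 start hsM hd1m hd1
    rw [hS2, hm']
    simp only [Option.getD_some]
    have hMj : ((M : Nat) : Int) ≤ (j : Int) := by exact_mod_cast hMle
    by_cases hml : minL > (j : Int) - (M : Int) + 1
    · rw [if_pos hml]
      have hbest : min best ((j : Int) - (M : Int) + 1) = (j : Int) - (M : Int) + 1 :=
        min_eq_right (le_of_lt (h12 ▸ hml))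
      refine ⟨h1', h2', h3', h4', hc1, hSm, hSd, by omega,
        fun hcon => absurd hq hcon, fun _ => by rw [hm']; simp, hbest.symm, rfl,
        by omega, by omega, by omega⟩
    · rw [if_neg hml]
      have hbest : min best ((j : Int) - (M : Int) + 1) = best :=
        min_eq_left (by rw [← h12]; omega)
      exact ⟨h1', h2', h3', h4', hc1, hSm, hSd, by omega,
        fun hcon => absurd hq hcon, fun _ => by rw [hm']; simp, by rw [hbest]; exact h12,
        h13, h14, h15, h16⟩
  · have hql : ¬ ((last'.size : Int) = ((PySem.Set.ofList l).length : Int)) := by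
      rw [← hc1]; exact hq
    rw [if_neg hq, if_neg hql]
    exact ⟨h1', h2', h3', h4', hc1, hd1m, hd1, by omega, fun _ => h10 hq,
      fun hcon => absurd hcon hq, h12, h13, h14, h15, h16⟩

lemma pvInv_step (l : List Char) (j : Nat) (hj : j < l.length)
    (a : PySem.Dict Char Int × Int × Nat × Int × Int × Int)
    (b : PySem.Dict Char Int × Int)
    (h : pvInv l j a b) :
    pvInv l (j + 1)
      (pvStepA l ((PySem.Set.ofList l).length : Int) a (j : Int))
      (pvStepB ((PySem.Set.ofList l).length : Int) b ((j : Int), l.getD j ' ')) := by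
  obtain ⟨d, count, start, minL, si, ew⟩ := a
  obtain ⟨last, best⟩ := b
  simp only [pvInv] at h
  obtain ⟨h1, h2, h3, h4, h5, h7, h8, h9, h10, h11, h12, h13, h14, h15, h16⟩ := h
  have hxj : l[j] = l.getD j ' ' := (List.getD_eq_getElem l ' ' hj).symm
  have ht : l.take (j + 1) = l.take j ++ [l.getD j ' '] := by
    rw [List.take_add_one, List.getElem?_eq_getElem hj]
    simp [hxj]
  have hlenj : (l.take j).length = j := by simp [List.length_take]; omega
  have hwin : (l.take (j + 1)).drop start = (l.take j).drop start ++ [l.getD j ' '] := by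
    rw [ht, List.drop_append_of_le_length (by omega)]
  have h1' : (last.insert (l.getD j ' ') (j : Int)).keys.Nodup :=
    PySem.Dict.nodup_keys_insert last _ _ h1
  have h2' : ∀ c, (last.insert (l.getD j ' ') (j : Int)).contains c = true ↔
      c ∈ l.take (j + 1) := by
    intro c
    rw [PySem.Dict.contains_insert, ht]
    simp only [Bool.or_eq_true, beq_iff_eq, List.mem_append, List.mem_singleton]
    rw [h2 c]
    tauto
  have h3' : ∀ c i, (last.insert (l.getD j ' ') (j : Int)).get? c = some i →
      ∃ k : Nat, i = (k : Int) ∧ k < j + 1 ∧ l.getD k ' ' = c ∧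
        c ∉ (l.take (j + 1)).drop (k + 1) := by
    intro c i hci
    rw [PySem.Dict.get?_insert] at hci
    by_cases hcx : c = l.getD j ' '
    · rw [if_pos hcx] at hci
      refine ⟨j, (Option.some.inj hci).symm, by omega, hcx.symm, ?_⟩
      have hlt : (l.take (j + 1)).length = j + 1 := by simp [List.length_take]; omega
      rw [List.drop_eq_nil_of_le (by omega)]
      simp
    · rw [if_neg hcx] at hci
      obtain ⟨k, hk, hklt, hkc, hknot⟩ := h3 c i hci
      refine ⟨k, hk, by omega, hkc, ?_⟩
      rw [ht, List.drop_append_of_le_length (by omega : k + 1 ≤ (l.take j).length)]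
      intro hmem
      rcases List.mem_append.1 hmem with hm | hm
      · exact hknot hm
      · exact hcx (List.mem_singleton.1 hm)
  have h4' : (last.insert (l.getD j ' ') (j : Int)).size =
      (PySem.Set.ofList (l.take (j + 1))).length := by
    rw [ht, pvSetLen_append, PySem.Dict.size_insert]
    by_cases hmx : l.getD j ' ' ∈ l.take j
    · rw [if_pos ((h2 _).2 hmx), if_pos hmx, h4]
      omega
    · have hcf : last.contains (l.getD j ' ') = false := by
        cases hcc : last.contains (l.getD j ' ') with
        | false => rfl
        | true => exact absurd ((h2 _).1 hcc) hmx
      rw [hcf, if_neg hmx, h4]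
      simp
  have hmono1 : (PySem.Set.ofList (l.take j)).length ≤
      (PySem.Set.ofList (l.take (j + 1))).length := by
    have hh := pvSetLen_take_le (l.take (j + 1)) j
    rwa [List.take_take, min_eq_left (by omega)] at hh
  have hmono2 : (PySem.Set.ofList (l.take (j + 1))).length ≤ (PySem.Set.ofList l).length :=
    pvSetLen_take_le l (j + 1)
  have hcount_eq : count = ((PySem.Set.ofList (l.take j)).length : Int) := by rw [h5, h4]
  have hsm : ∀ m : Int,
      PySem.List.min? (last.insert (l.getD j ' ') (j : Int)).values (fun v => v) = some m →
      (start : Int) ≤ m := by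
    intro m hm
    obtain ⟨c, hc⟩ := pvGet?_of_mem_values h1' (PySem.List.min?_mem hm)
    rw [PySem.Dict.get?_insert] at hc
    by_cases hcx : c = l.getD j ' '
    · rw [if_pos hcx] at hc
      have hmj : m = (j : Int) := (Option.some.inj hc).symm
      rw [hmj]
      exact_mod_cast h9
    · rw [if_neg hcx] at hc
      by_cases hcd : count = ((PySem.Set.ofList l).length : Int)
      · have hse := h11 hcd
        have hvne : last.values ≠ [] := by
          intro hv
          have hsz : last.size = 0 := by rw [← pvValues_length, hv]; rfl
          have hp := pvSetLen_pos l (by intro hnil; rw [hnil] at hj; simp at hj)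
          rw [h5, hsz] at hcd
          simp at hcd
          omega
        obtain ⟨m0, hm0⟩ : ∃ m0, PySem.List.min? last.values (fun v => v) = some m0 := by
          cases hmm : PySem.List.min? last.values (fun v => v) with
          | none => exact absurd ((PySem.List.min?_eq_none_iff _ _).1 hmm) hvne
          | some m0 => exact ⟨m0, rfl⟩
        have hle : m0 ≤ m := PySem.List.min?_isMin hm0 m (pvMemValues_of_get? hc)
        rw [hse, hm0]
        simpa using hle
      · rw [h10 hcd]
        obtain ⟨k, hk, _, _, _⟩ := h3 c m hc
        rw [hk]
        simp
  cases hcd : d.contains (l.getD j ' ') with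
  | false =>
    have hmx : l.getD j ' ' ∉ l.take j := by
      intro hmem
      rw [(h7 _).2 hmem] at hcd
      cases hcd
    have hd1m : ∀ c, (d.insert (l.getD j ' ') 1).contains c = true ↔ c ∈ l.take (j + 1) := by
      intro c
      rw [PySem.Dict.contains_insert, ht]
      simp only [Bool.or_eq_true, beq_iff_eq, List.mem_append, List.mem_singleton]
      rw [h7 c]
      tauto
    have hd1 : ∀ c, (d.insert (l.getD j ' ') 1).getD c 0 =
        (((l.take (j + 1)).drop start).count c : Int) := by
      intro c
      rw [PySem.Dict.getD_insert, hwin]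
      by_cases hce : c = l.getD j ' '
      · rw [if_pos hce]
        have h0 : ((l.take j).drop start).count c = 0 :=
          List.count_eq_zero.2 (fun hmem => hmx (hce ▸ List.mem_of_mem_drop hmem))
        have h1 : List.count c [l.getD j ' '] = 1 := by
          rw [hce]
          simp
        rw [List.count_append, h0, h1]
        omega
      · rw [if_neg hce, h8 c, List.count_append]
        have h0 : List.count c [l.getD j ' '] = 0 := by
          simp only [List.count_cons, List.count_nil, beq_iff_eq]
          rw [if_neg (fun h => hce (Eq.symm h))]
        rw [h0]
        push_cast
        ring
    have hcount1 : count + 1 = ((last.insert (l.getD j ' ') (j : Int)).size : Int) := by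
      rw [h4', ht, pvSetLen_append, if_neg hmx, hcount_eq]
      push_cast
      ring
    have h10' : count + 1 ≠ ((PySem.Set.ofList l).length : Int) → start = 0 := by
      intro _
      apply h10
      intro hcdq
      have hle : count + 1 ≤ ((PySem.Set.ofList l).length : Int) := by
        rw [hcount1, h4']
        exact_mod_cast hmono2
      omega
    have key := pvInv_step2 l j hj (d.insert (l.getD j ' ') 1) (count + 1) start minL si ew
      (last.insert (l.getD j ' ') (j : Int)) best h1' h2' h3' h4' hcount1 hd1m hd1 h9 h10'
      hsm h12 h13 h14 h15 h16
    simp only [pvStepA, pvStepB, PySem.List.pyGetD_natCast, hcd, Bool.false_eq_true,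
      if_false] at key ⊢
    exact key
  | true =>
    have hmx : l.getD j ' ' ∈ l.take j := (h7 _).1 hcd
    have hd1m : ∀ c, (d.modify (l.getD j ' ') 0 (· + 1)).contains c = true ↔
        c ∈ l.take (j + 1) := by
      intro c
      rw [PySem.Dict.contains_modify, ht]
      simp only [Bool.or_eq_true, beq_iff_eq, List.mem_append, List.mem_singleton]
      rw [h7 c]
      constructor
      · rintro (rfl | hc)
        · exact Or.inl hmx
        · exact Or.inl hc
      · rintro (hc | rfl)
        · exact Or.inr hc
        · exact Or.inl rfl
    have hd1 : ∀ c, (d.modify (l.getD j ' ') 0 (· + 1)).getD c 0 =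
        (((l.take (j + 1)).drop start).count c : Int) := by
      intro c
      rw [PySem.Dict.getD_modify, hwin]
      by_cases hce : c = l.getD j ' '
      · rw [if_pos hce, h8, hce, List.count_append]
        have h1 : List.count (l.getD j ' ') [l.getD j ' '] = 1 := by simp
        rw [h1]
        push_cast
        ring
      · rw [if_neg hce, h8 c, List.count_append]
        have h0 : List.count c [l.getD j ' '] = 0 := by
          simp only [List.count_cons, List.count_nil, beq_iff_eq]
          rw [if_neg (fun h => hce (Eq.symm h))]
        rw [h0]
        push_cast
        ring
    have hcount1 : count = ((last.insert (l.getD j ' ') (j : Int)).size : Int) := by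
      rw [h4', ht, pvSetLen_append, if_pos hmx, hcount_eq]
      push_cast
      ring
    have key := pvInv_step2 l j hj (d.modify (l.getD j ' ') 0 (· + 1)) count start minL si ew
      (last.insert (l.getD j ' ') (j : Int)) best h1' h2' h3' h4' hcount1 hd1m hd1 h9 h10
      hsm h12 h13 h14 h15 h16
    simp only [pvStepA, pvStepB, PySem.List.pyGetD_natCast, hcd, if_true] at key ⊢
    exact key

lemma pvInv_zero (l : List Char) :
    pvInv l 0 (PySem.Dict.empty, 0, 0, (l.length : Int), 0, (l.length : Int))
      (PySem.Dict.empty, (l.length : Int)) := by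
  refine ⟨?_, ?_, ?_, ?_, ?_, ?_, ?_, ?_, ?_, ?_, ?_, ?_, ?_, ?_, ?_⟩
  · rw [PySem.Dict.keys_empty]; exact List.nodup_nil
  · intro c; simp [PySem.Dict.contains_empty]
  · intro c i hci; rw [PySem.Dict.get?_empty] at hci; cases hci
  · rw [PySem.Dict.size_empty, List.take_zero, PySem.Set.ofList_eq_foldl]; rfl
  · rw [PySem.Dict.size_empty]; rfl
  · intro c; simp [PySem.Dict.contains_empty]
  · intro c; simp [PySem.Dict.getD_empty]
  · exact le_refl 0
  · intro _; trivial
  · intro _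
    have hv : (PySem.Dict.empty : PySem.Dict Char Int).values = [] := rfl
    rw [hv, (PySem.List.min?_eq_none_iff _ _).2 rfl]
    trivial
  · trivial
  · simp
  · exact le_refl 0
  · simp
  · exact Int.natCast_nonneg _

lemma pvFoldA_succ (l : List Char) (j : Nat) :
    pvFoldA l (j + 1) = pvStepA l ((PySem.Set.ofList l).length : Int) (pvFoldA l j) (j : Int) := by
  unfold pvFoldA
  rw [show ((j + 1 : Nat) : Int) = (j : Int) + 1 by push_cast; ring,
    PySem.List.pyRange_one_succ_right (Int.natCast_nonneg j), List.foldl_append,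
    List.foldl_cons, List.foldl_nil]

lemma pvFoldB_succ (l : List Char) (j : Nat) (hj : j < l.length) :
    pvFoldB l (j + 1) =
      pvStepB ((PySem.Set.ofList l).length : Int) (pvFoldB l j) ((j : Int), l.getD j ' ') := by
  unfold pvFoldB
  have hxj : l[j] = l.getD j ' ' := (List.getD_eq_getElem l ' ' hj).symm
  have ht : l.take (j + 1) = l.take j ++ [l.getD j ' '] := by
    rw [List.take_add_one, List.getElem?_eq_getElem hj]
    simp [hxj]
  rw [ht, PySem.List.enumerate_append, PySem.List.enumerate_cons, PySem.List.enumerate_nil,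
    show (0 : Int) + ((l.take j).length : Int) = (j : Int) by
      rw [List.length_take, min_eq_left hj.le]; simp,
    List.foldl_append, List.foldl_cons, List.foldl_nil]

lemma pvInv_fold (l : List Char) (j : Nat) (hj : j ≤ l.length) :
    pvInv l j (pvFoldA l j) (pvFoldB l j) := by
  induction j with
  | zero =>
    have hA : pvFoldA l 0 = (PySem.Dict.empty, 0, 0, (l.length : Int), 0, (l.length : Int)) := by
      unfold pvFoldA
      rw [show ((0 : Nat) : Int) = 0 by norm_num, PySem.List.pyRange_one_eq_nil (le_refl 0)]
      rfl
    have hB : pvFoldB l 0 = (PySem.Dict.empty, (l.length : Int)) := by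
      unfold pvFoldB
      rw [List.take_zero, PySem.List.enumerate_nil]
      rfl
    rw [hA, hB]
    exact pvInv_zero l
  | succ j ih =>
    have hj' : j < l.length := by omega
    rw [pvFoldA_succ, pvFoldB_succ l j hj']
    exact pvInv_step l j hj' _ _ (ih (by omega))

-- ===== VERDICT (by name: the statement is the Claim_ definition above) =====
theorem find_min_distinct_substring_spec : Claim_equal_find_min_distinct_substring := by
  unfold Claim_equal_find_min_distinct_substring
  intro S _
  unfold Spec_find_min_distinct_substring find_min_distinct_substring find_min_distinct_substring_alt
  dsimp only
  generalize S.toList = l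
  have hA : (PySem.List.pyRange 0 (l.length : Int) 1).foldl
      (pvStepA l ((PySem.Set.ofList l).length : Int))
      (PySem.Dict.empty, 0, 0, (l.length : Int), 0, (l.length : Int)) = pvFoldA l l.length := rfl
  have hB : (PySem.List.enumerate l 0).foldl
      (pvStepB ((PySem.Set.ofList l).length : Int))
      (PySem.Dict.empty, (l.length : Int)) = pvFoldB l l.length := by
    unfold pvFoldB
    rw [List.take_length]
  rw [hA, hB]
  rcases hst : pvFoldA l l.length with ⟨d, count, start, minL, si, ew⟩
  rcases hsb : pvFoldB l l.length with ⟨last, best⟩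
  have hinv := pvInv_fold l l.length (le_refl _)
  rw [hst, hsb] at hinv
  simp only [pvInv] at hinv
  obtain ⟨-, -, -, -, -, -, -, -, -, -, h12, h13, h14, h15, h16⟩ := hinv
  have hLHS : ((PySem.List.slice l (some si) (some ew)).length : Int) = minL := by
    rw [h13, PySem.List.slice_toNat l h14 (by omega)]
    simp only [List.length_take, List.length_drop]
    omega
  rw [hLHS]
  by_cases hdc : ((PySem.Set.ofList l).length : Int) = 0
  · rw [if_pos hdc]
    have hln : l = [] := by
      by_contra hne
      have hp := pvSetLen_pos l hne
      have : (0 : Int) < ((PySem.Set.ofList l).length : Int) := by exact_mod_cast hp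
      omega
    subst hln
    have h15' : si + minL ≤ 0 := by simpa using h15
    omega
  · rw [if_neg hdc]
    exact h12
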